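-- pv_equiv track=rewrite | github.com/nerewarin/adventofcode2019 | 20.py | _is_portal_in_path
-- ===== SOURCE A (Python) =====
-- import itertools
--
-- def _is_portal_in_path(portal_title, expected_floor, expected_level, path):
--     for perm in itertools.permutations(portal_title, 2):
--         title = ''.join(perm)
--         for step in path:
--             vertex, floor, portal, level = step
--             if portal == title and floor == expected_floor and (level == expected_level if expected_level else True):
--                 return True
--     return False
-- ===== SOURCE B (Python) =====
-- def _is_portal_in_path(portal_title, expected_floor, expected_level, path):
--     # A two-character name is reachable as a 2-permutation of portal_title iff both
--     # characters occur in the title, at distinct positions.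
--     def reachable(name):
--         if len(name) != 2:
--             return False
--         a, b = name
--         if a == b:
--             return portal_title.count(a) >= 2
--         return a in portal_title and b in portal_title
--     for vertex, floor, portal, level in path:
--         if floor == expected_floor and (level == expected_level if expected_level else True) and reachable(portal):
--             return True
--     return False
-- ===== Notes on version B (the rewrite author's own statement) =====
-- stated objective: faster
-- what changed: B never materialises the 2-permutations of the title: it makes a single pass over path and tests each step's portal name directly with a character-membership/count criterion (a 2-char name is a 2-permutation of the title iff both chars occur there, at distinct positions), instead of A's outer loop over every permutation each rescanning the whole path.
import Mathlib
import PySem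

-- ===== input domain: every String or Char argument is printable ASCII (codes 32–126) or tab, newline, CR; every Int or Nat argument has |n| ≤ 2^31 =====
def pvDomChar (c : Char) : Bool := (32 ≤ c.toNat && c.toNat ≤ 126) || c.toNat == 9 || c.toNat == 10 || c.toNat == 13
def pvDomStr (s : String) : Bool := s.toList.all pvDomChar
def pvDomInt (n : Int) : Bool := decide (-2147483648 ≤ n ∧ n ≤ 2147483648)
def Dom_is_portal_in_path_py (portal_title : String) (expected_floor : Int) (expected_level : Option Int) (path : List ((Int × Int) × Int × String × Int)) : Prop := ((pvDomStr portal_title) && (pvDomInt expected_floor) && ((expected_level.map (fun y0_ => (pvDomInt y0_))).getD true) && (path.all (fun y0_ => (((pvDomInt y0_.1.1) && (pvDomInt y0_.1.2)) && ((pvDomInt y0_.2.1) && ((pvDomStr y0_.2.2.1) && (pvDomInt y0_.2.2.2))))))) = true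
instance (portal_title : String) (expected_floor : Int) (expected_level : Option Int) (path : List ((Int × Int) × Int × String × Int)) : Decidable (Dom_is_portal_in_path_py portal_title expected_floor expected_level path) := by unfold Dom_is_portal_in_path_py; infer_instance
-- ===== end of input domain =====

-- B replaces A's generate-all-2-permutations-and-rescan strategy by a single path scan
-- with a direct character-count reachability test on each step's portal name (simpler, one pass).


-- ===== PORT A =====
-- itertools.permutations(portal_title, 2) joined: for each index i, each index j ≠ i in order, the 2-char string s[i]+s[j]
def pvPerm2 (cs : List Char) : List String :=
  cs.zipIdx.flatMap (fun ci =>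
    cs.zipIdx.filterMap (fun dj =>
      if ci.2 ≠ dj.2 then some (String.ofList [ci.1, dj.1]) else none))

-- Python's `level == expected_level if expected_level else True` (0 and None are falsy)
def pvLevelOk (expected_level : Option Int) (level : Int) : Bool :=
  match expected_level with
  | none => true
  | some v => if v = 0 then true else level == v

def is_portal_in_path_py (portal_title : String) (expected_floor : Int) (expected_level : Option Int) (path : List ((Int × Int) × Int × String × Int)) : Bool :=
  (pvPerm2 portal_title.toList).any (fun title =>
    path.any (fun step =>
      step.2.2.1 == title && (step.2.1 == expected_floor && pvLevelOk expected_level step.2.2.2)))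

-- ===== PORT B =====
-- Source B's `reachable`: a 2-char name is a 2-permutation of the title iff its characters
-- occur at distinct title positions (equal chars need count ≥ 2).
def pvReachable (title : List Char) (name : List Char) : Bool :=
  match name with
  | [a, b] => if a == b then decide (2 ≤ title.count a) else title.contains a && title.contains b
  | _ => false

def is_portal_in_path_py_alt (portal_title : String) (expected_floor : Int) (expected_level : Option Int) (path : List ((Int × Int) × Int × String × Int)) : Bool :=
  path.any (fun step =>
    step.2.1 == expected_floor
      && (match expected_level with
          | none => true
          | some v => v == 0 || step.2.2.2 == v)
      && pvReachable portal_title.toList step.2.2.1.toList)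

-- ===== PRECONDITION & SPEC =====
def Spec_is_portal_in_path_py (portal_title : String) (expected_floor : Int) (expected_level : Option Int) (path : List ((Int × Int) × Int × String × Int)) (out : Bool) : Prop := out = is_portal_in_path_py_alt portal_title expected_floor expected_level path
instance (portal_title : String) (expected_floor : Int) (expected_level : Option Int) (path : List ((Int × Int) × Int × String × Int)) (out : Bool) : Decidable (Spec_is_portal_in_path_py portal_title expected_floor expected_level path out) := by unfold Spec_is_portal_in_path_py; infer_instance

-- ===== CLAIM (what is proved, stated in full; the proofs are below) =====
def Claim_equal_is_portal_in_path_py : Prop := ∀ (portal_title : String) (expected_floor : Int) (expected_level : Option Int) (path : List ((Int × Int) × Int × String × Int)), Dom_is_portal_in_path_py portal_title expected_floor expected_level path → Spec_is_portal_in_path_py portal_title expected_floor expected_level path (is_portal_in_path_py portal_title expected_floor expected_level path)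

-- ===== LEMMAS AND PROOFS =====

-- a String equals String.ofList l iff its character list is l
theorem pv_eq_ofList (p : String) (l : List Char) : p = String.ofList l ↔ p.toList = l := by
  constructor
  · intro h; simp [h]
  · intro h; rw [← h, String.ofList_toList]

-- membership in A's permutation list = a distinct-index pair of title characters
theorem mem_pvPerm2 (cs : List Char) (p : String) :
    p ∈ pvPerm2 cs ↔ ∃ x : Char × Char, x ∈ cs.offDiag ∧ p = String.ofList [x.1, x.2] := by
  simp only [pvPerm2, List.mem_flatMap, List.mem_filterMap]
  constructor
  · rintro ⟨⟨a, i⟩, hai, ⟨b, j⟩, hbj, hif⟩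
    by_cases hij : i = j
    · simp [hij] at hif
    · rw [if_pos (by simpa using hij)] at hif
      rw [List.mk_mem_zipIdx_iff_getElem?, List.getElem?_eq_some_iff] at hai hbj
      rcases hai with ⟨hi, ha⟩
      rcases hbj with ⟨hj, hb⟩
      exact ⟨(a, b), List.mem_offDiag_iff_getElem.mpr ⟨i, hi, j, hj, hij, ha, hb⟩,
        (Option.some_inj.mp hif).symm⟩
  · rintro ⟨⟨a, b⟩, hmem, rfl⟩
    rcases List.mem_offDiag_iff_getElem.mp hmem with ⟨i, hi, j, hj, hij, ha, hb⟩
    refine ⟨(a, i), ?_, (b, j), ?_, by rw [if_pos (by simpa using hij)]⟩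
    · rw [List.mk_mem_zipIdx_iff_getElem?, List.getElem?_eq_some_iff]; exact ⟨hi, ha⟩
    · rw [List.mk_mem_zipIdx_iff_getElem?, List.getElem?_eq_some_iff]; exact ⟨hj, hb⟩

-- B's count test on a character list = a distinct-index pair of title characters
theorem pvReachable_iff_list (cs ns : List Char) :
    pvReachable cs ns = true ↔ ∃ x : Char × Char, x ∈ cs.offDiag ∧ ns = [x.1, x.2] := by
  rcases ns with _ | ⟨a, _ | ⟨b, _ | ⟨c, t⟩⟩⟩
  · simp [pvReachable]
  · simp [pvReachable]
  case cons.cons.cons => simp [pvReachable]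
  case cons.cons.nil =>
    have hCount : List.count (a, b) cs.offDiag
        = cs.count a * cs.count b - if a = b then cs.count a else 0 :=
      List.count_offDiag_eq_mul_sub_ite cs a b
    have hmem : (a, b) ∈ cs.offDiag ↔ 0 < List.count (a, b) cs.offDiag :=
      List.count_pos_iff.symm
    constructor
    · intro h
      refine ⟨(a, b), ?_, rfl⟩
      rw [hmem, hCount]
      by_cases hab : a = b
      · subst hab
        rw [pvReachable] at h
        have h2 : 2 ≤ cs.count a := by simpa using h
        have := Nat.mul_le_mul_left (cs.count a) h2
        rw [if_pos rfl]
        omega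
      · rw [pvReachable, if_neg (by simpa using hab)] at h
        simp only [Bool.and_eq_true, List.contains_iff_mem] at h
        have ha : 0 < cs.count a := List.count_pos_iff.mpr (by simpa using h.1)
        have hb : 0 < cs.count b := List.count_pos_iff.mpr (by simpa using h.2)
        rw [if_neg hab]
        have := Nat.mul_pos ha hb
        omega
    · rintro ⟨⟨a', b'⟩, hx, heq⟩
      simp only [List.cons.injEq, and_true] at heq
      obtain ⟨rfl, rfl⟩ := heq
      rw [hmem, hCount] at hx
      by_cases hab : a = b
      · subst hab
        rw [if_pos rfl] at hx
        rw [pvReachable]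
        simp only [BEq.rfl, if_pos, decide_eq_true_eq]
        by_contra hlt
        have h1 : cs.count a ≤ 1 := by omega
        have := Nat.mul_le_mul_left (cs.count a) h1
        omega
      · rw [if_neg hab] at hx
        have ha : a ∈ cs := List.count_pos_iff.mp (Nat.pos_of_mul_pos_left (by rwa [Nat.mul_comm] at hx))
        have hb : b ∈ cs := List.count_pos_iff.mp (Nat.pos_of_mul_pos_left hx)
        rw [pvReachable, if_neg (by simpa using hab)]
        simp [ha, hb]

-- ===== VERDICT (by name: the statement is the Claim_ definition above) =====
theorem is_portal_in_path_py_spec : Claim_equal_is_portal_in_path_py := by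
  intro pt ef el path _
  simp only [Spec_is_portal_in_path_py, is_portal_in_path_py, is_portal_in_path_py_alt]
  apply Bool.eq_iff_iff.mpr
  simp only [List.any_eq_true, Bool.and_eq_true]
  constructor
  · rintro ⟨t, ht, s, hs, hst, hfl, hlvl⟩
    refine ⟨s, hs, ⟨hfl, ?_⟩, ?_⟩
    · rcases el with _ | v
      · rfl
      · simp only [pvLevelOk] at hlvl
        by_cases hv : v = 0 <;> simp_all
    · rw [pvReachable_iff_list]
      rcases (mem_pvPerm2 pt.toList t).mp ht with ⟨x, hx, rfl⟩
      exact ⟨x, hx, (pv_eq_ofList _ _).mp (beq_iff_eq.mp hst)⟩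
  · rintro ⟨s, hs, ⟨hfl, hlvl⟩, hreach⟩
    rcases (pvReachable_iff_list pt.toList s.2.2.1.toList).mp hreach with ⟨x, hx, heq⟩
    refine ⟨String.ofList [x.1, x.2],
      (mem_pvPerm2 pt.toList _).mpr ⟨x, hx, rfl⟩, s, hs,
      beq_iff_eq.mpr ((pv_eq_ofList _ _).mpr heq), hfl, ?_⟩
    rcases el with _ | v
    · rfl
    · simp only [pvLevelOk]
      by_cases hv : v = 0 <;> simp_all
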